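-- pv_equiv track=rewrite | github.com/sg4213/HG_search | make_report.py | determine_overall
-- ===== SOURCE A (Python) =====
-- def determine_overall(result_dict):
--     """
--     Decide overall: return 'WC' if WC votes > HG votes, 'HG' if HG votes > WC votes,
--     otherwise 'Ambiguous' (i.e., only when counts are equal).
--     """
--     wc_count = sum(v == "WC" for v in result_dict.values() if v is not None)
--     hg_count = sum(v == "HG" for v in result_dict.values() if v is not None)
--
--     if wc_count > hg_count:
--         return "WC"
--     if hg_count > wc_count:
--         return "HG"
--     return "Ambiguous"
-- ===== SOURCE B (Python) =====
-- def determine_overall(result_dict):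
--     """
--     Decide overall: return 'WC' if WC votes > HG votes, 'HG' if HG votes > WC votes,
--     otherwise 'Ambiguous' (i.e., only when counts are equal).
--     """
--     score = 0
--     for v in result_dict.values():
--         if v == "WC":
--             score += 1
--         elif v == "HG":
--             score -= 1
--     if score > 0:
--         return "WC"
--     if score < 0:
--         return "HG"
--     return "Ambiguous"
-- ===== Notes on version B (the rewrite author's own statement) =====
-- stated objective: alternative
-- what changed: Instead of tallying the two vote counts in two filtered passes and comparing them, B maintains a single signed running balance (+1 for WC, -1 for HG) in one pass and decides by the sign of the balance; no counts and no None filter are ever materialized.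
import Mathlib
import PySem

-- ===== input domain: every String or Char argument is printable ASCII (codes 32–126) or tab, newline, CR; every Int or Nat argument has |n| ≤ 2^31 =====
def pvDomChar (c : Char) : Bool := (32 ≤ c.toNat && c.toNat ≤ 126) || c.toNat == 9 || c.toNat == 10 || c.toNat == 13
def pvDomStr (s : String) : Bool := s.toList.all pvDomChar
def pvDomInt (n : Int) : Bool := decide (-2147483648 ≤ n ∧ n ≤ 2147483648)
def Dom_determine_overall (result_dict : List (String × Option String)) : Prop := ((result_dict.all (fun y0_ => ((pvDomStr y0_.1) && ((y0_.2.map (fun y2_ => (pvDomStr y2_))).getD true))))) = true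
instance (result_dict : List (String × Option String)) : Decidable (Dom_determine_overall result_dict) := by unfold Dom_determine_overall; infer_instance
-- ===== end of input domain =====

-- B replaces A's two filtered counting passes by a single signed running balance (+1 for WC, -1 for HG) decided by its sign (objective: alternative).

-- ===== PORT A =====
def determine_overall (result_dict : List (String × Option String)) : String :=
  let vals := (PySem.Dict.ofList result_dict).values
  let wc_count : Int :=
    (vals.filter (fun v => v.isSome)).foldl (fun acc v => acc + (if v == some "WC" then 1 else 0)) 0
  let hg_count : Int :=
    (vals.filter (fun v => v.isSome)).foldl (fun acc v => acc + (if v == some "HG" then 1 else 0)) 0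
  if wc_count > hg_count then "WC"
  else if hg_count > wc_count then "HG"
  else "Ambiguous"

-- ===== PORT B =====
def determine_overall_alt (result_dict : List (String × Option String)) : String :=
  let vals := (PySem.Dict.ofList result_dict).values
  let score : Int :=
    vals.foldl (fun sc v =>
      if v == some "WC" then sc + 1
      else if v == some "HG" then sc - 1
      else sc) 0
  if score > 0 then "WC"
  else if score < 0 then "HG"
  else "Ambiguous"

-- ===== PRECONDITION & SPEC =====
def Spec_determine_overall (result_dict : List (String × Option String)) (out : String) : Prop := out = determine_overall_alt result_dict
instance (result_dict : List (String × Option String)) (out : String) : Decidable (Spec_determine_overall result_dict out) := by unfold Spec_determine_overall; infer_instance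

-- ===== CLAIM (what is proved, stated in full; the proofs are below) =====
def Claim_equal_determine_overall : Prop := ∀ (result_dict : List (String × Option String)), Dom_determine_overall result_dict → Spec_determine_overall result_dict (determine_overall result_dict)

-- ===== LEMMAS AND PROOFS =====

-- A's filtered boolean sum counts the occurrences of `some s`.
theorem sumA_eq_count (l : List (Option String)) (s : String) (acc : Int) :
    (l.filter (fun v => v.isSome)).foldl (fun acc v => acc + (if v == some s then 1 else 0)) acc
      = acc + (l.count (some s) : Int) := by
  induction l generalizing acc with
  | nil => simp
  | cons h t ih =>
    cases h with
    | none =>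
      rw [List.filter_cons_of_neg (by simp), ih, List.count_cons]
      simp
    | some x =>
      simp only [List.filter_cons, Option.isSome_some, if_true, List.foldl_cons, List.count_cons]
      rw [ih]
      by_cases hx : some x = some s <;> simp_all; ring

-- B's running balance is the count of WC minus the count of HG.
theorem scoreB_eq (l : List (Option String)) (acc : Int) :
    l.foldl (fun sc v =>
      if v == some "WC" then sc + 1
      else if v == some "HG" then sc - 1
      else sc) acc
      = acc + (l.count (some "WC") : Int) - (l.count (some "HG") : Int) := by
  induction l generalizing acc with
  | nil => simp
  | cons h t ih =>
    simp only [List.foldl_cons, List.count_cons, ih]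
    by_cases h1 : h = some "WC"
    · simp [h1]; push_cast; ring
    · by_cases h2 : h = some "HG" <;> simp_all; ring

-- ===== VERDICT (by name: the statement is the Claim_ definition above) =====
theorem determine_overall_spec : Claim_equal_determine_overall := by
  intro rd _
  unfold Spec_determine_overall determine_overall determine_overall_alt
  simp only [sumA_eq_count, scoreB_eq, zero_add]
  split_ifs <;> first | rfl | omega
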